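-- pv_equiv track=rewrite | github.com/1337DaKL/Bai_Tap_Python | 28tech/hamvalisthuyetso/luyentapvietham.py | ham4
-- ===== SOURCE A (Python) =====
-- def ham4(n):
--     tong = 0
--     while (n):
--         m = n % 10
--         if (m == 2 or m == 3 or m == 5 or m == 7):
--             tong += m
--         n //= 10
--     return tong
-- ===== SOURCE B (Python) =====
-- # B: sum the prime digits by scanning the characters of str(n) with a digit-value
-- # table, instead of A's running-quotient divmod loop (idiomatic; same cost).
-- _PRIME_DIGIT = {'2': 2, '3': 3, '5': 5, '7': 7}
--
-- def ham4(n):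
--     return sum(_PRIME_DIGIT.get(c, 0) for c in str(n))
-- ===== Notes on version B (the rewrite author's own statement) =====
-- stated objective: idiomatic
-- what changed: B converts n to its decimal string once and sums a table lookup over its characters, instead of A's while-loop that repeatedly takes n % 10 and floor-divides n by 10.
-- outside the precondition, e.g. on ham4(-3): A does not finish within the time limit, B returns 3
import Mathlib
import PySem

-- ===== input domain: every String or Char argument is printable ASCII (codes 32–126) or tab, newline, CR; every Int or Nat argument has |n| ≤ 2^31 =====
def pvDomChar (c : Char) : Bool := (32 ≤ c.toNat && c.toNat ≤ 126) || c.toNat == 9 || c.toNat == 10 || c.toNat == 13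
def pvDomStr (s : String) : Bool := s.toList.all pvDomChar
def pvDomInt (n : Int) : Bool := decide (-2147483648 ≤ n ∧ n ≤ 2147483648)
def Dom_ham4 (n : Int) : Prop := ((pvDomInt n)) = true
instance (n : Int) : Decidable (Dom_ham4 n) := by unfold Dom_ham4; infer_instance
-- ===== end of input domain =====

-- B sums a digit-value table over the characters of str(n) instead of A's divmod loop (idiomatic, same cost).
-- Pre_ham4 restricts to 0 ≤ n: for negative n the Python A loops forever (n//10 stalls at -1), returning nothing.


-- ===== PORT A =====
-- the while(n) loop; the guard is written `0 < n` (not `n ≠ 0`) for termination: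
-- for n < 0 the Python loop never terminates, and such n are excluded by Pre_ham4.
def ham4Loop (n : Int) (tong : Int) : Int :=
  if _hn : 0 < n then
    let m := PySem.Int.mod n 10
    ham4Loop (PySem.Int.floordiv n 10)
      (if m = 2 ∨ m = 3 ∨ m = 5 ∨ m = 7 then tong + m else tong)
  else tong
termination_by n.toNat
decreasing_by
  have h' := Int.fdiv_eq_ediv_of_nonneg (a := n) (b := 10) (by norm_num)
  simp only [PySem.Int.floordiv, h']
  omega

def ham4 (n : Int) : Int := ham4Loop n 0

-- ===== PORT B =====
-- _PRIME_DIGIT.get(c, 0)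
def pvPrimeDigit (c : Char) : Int :=
  if c = '2' then 2 else if c = '3' then 3 else if c = '5' then 5 else if c = '7' then 7 else 0

-- sum(_PRIME_DIGIT.get(c, 0) for c in str(n))
def ham4_alt (n : Int) : Int :=
  ((PySem.Int.toStr n).toList).foldl (fun acc c => acc + pvPrimeDigit c) 0

-- ===== PRECONDITION & SPEC =====
-- A returns only for n ≥ 0; for n < 0 its while-loop diverges (n//10 stalls at -1).
def Pre_ham4 (n : Int) : Prop := 0 ≤ n
instance (n : Int) : Decidable (Pre_ham4 n) := by unfold Pre_ham4; infer_instance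
def pvWitness_ham4 : Int := 235

def Spec_ham4 (n : Int) (out : Int) : Prop := out = ham4_alt n
instance (n : Int) (out : Int) : Decidable (Spec_ham4 n out) := by unfold Spec_ham4; infer_instance

-- ===== CLAIM (what is proved, stated in full; the proofs are below) =====
def Claim_equal_ham4 : Prop := ∀ (n : Int), Dom_ham4 n → Pre_ham4 n → Spec_ham4 n (ham4 n)

-- ===== LEMMAS AND PROOFS =====

-- prime-digit contribution of a natural digit value, as an Int
def pvPr (m : Nat) : Int := if m = 2 ∨ m = 3 ∨ m = 5 ∨ m = 7 then (m : Int) else 0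

-- mathematical form of A's loop on naturals
def pvSA (n : Nat) : Int :=
  if n = 0 then 0 else pvPr (n % 10) + pvSA (n / 10)
decreasing_by exact Nat.div_lt_self (Nat.pos_of_ne_zero (by assumption)) (by norm_num)

theorem pvSA_step (m : Nat) : pvSA m = pvPr (m % 10) + pvSA (m / 10) := by
  by_cases h : m = 0
  · subst h; simp [pvSA, pvPr]
  · rw [pvSA]; simp [h]

theorem ham4Loop_eq (n : Nat) (t : Int) : ham4Loop (n : Int) t = t + pvSA n := by
  induction n using Nat.strong_induction_on generalizing t with
  | _ n ih =>
    by_cases h : n = 0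
    · subst h; rw [ham4Loop.eq_def, pvSA]; simp
    · have hn : (0 : Int) < (n : Int) := by exact_mod_cast Nat.pos_of_ne_zero h
      rw [ham4Loop.eq_def]
      have hm : PySem.Int.mod (n : Int) 10 = ((n % 10 : Nat) : Int) := by
        have h' := Int.fmod_eq_emod (a := (n:Int)) (b := 10)
        simp only [PySem.Int.mod]
        simp at h'
        omega
      have hd : PySem.Int.floordiv (n : Int) 10 = ((n / 10 : Nat) : Int) := by
        have h' := Int.fdiv_eq_ediv_of_nonneg (a := ((n:Nat) : Int)) (b := 10) (by norm_num)
        simp only [PySem.Int.floordiv, h']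
        omega
      simp only [hn, dif_pos, hm, hd]
      rw [ih (n / 10) (Nat.div_lt_self (Nat.pos_of_ne_zero h) (by norm_num)),
        pvSA_step n]
      unfold pvPr
      by_cases hp' : n % 10 = 2 ∨ n % 10 = 3 ∨ n % 10 = 5 ∨ n % 10 = 7
      · have hp : ((n % 10 : Nat) : Int) = 2 ∨ ((n % 10 : Nat) : Int) = 3 ∨
            ((n % 10 : Nat) : Int) = 5 ∨ ((n % 10 : Nat) : Int) = 7 := by omega
        rw [if_pos hp, if_pos hp']; ring
      · have hp : ¬ (((n % 10 : Nat) : Int) = 2 ∨ ((n % 10 : Nat) : Int) = 3 ∨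
            ((n % 10 : Nat) : Int) = 5 ∨ ((n % 10 : Nat) : Int) = 7) := by omega
        rw [if_neg hp, if_neg hp']; ring

theorem pvPrimeDigit_digitChar (d : Nat) (hd : d < 10) :
    pvPrimeDigit (Nat.digitChar d) = pvPr d := by
  interval_cases d <;> decide

theorem pvFoldl_eq_sum (cs : List Char) (t : Int) :
    cs.foldl (fun acc c => acc + pvPrimeDigit c) t = t + (cs.map pvPrimeDigit).sum := by
  induction cs generalizing t with
  | nil => simp
  | cons c cs ih => simp [ih, add_assoc]

theorem pvToDigitsCore_sum (fuel : Nat) :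
    ∀ (n : Nat) (ds : List Char), n < fuel →
      ((Nat.toDigitsCore 10 fuel n ds).map pvPrimeDigit).sum
        = pvPr (n % 10) + pvSA (n / 10) + ((ds.map pvPrimeDigit).sum) := by
  induction fuel with
  | zero => intro n ds h; omega
  | succ fuel ih =>
    intro n ds h
    rw [Nat.toDigitsCore]
    by_cases h0 : n / 10 = 0
    · rw [if_pos h0]
      simp [pvPrimeDigit_digitChar (n % 10) (Nat.mod_lt _ (by norm_num)), h0, pvSA]
    · rw [if_neg h0]
      rw [ih (n / 10) _ (by
        have : n / 10 < n := Nat.div_lt_self (by omega) (by norm_num)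
        omega)]
      rw [pvSA_step (n / 10)]
      simp [pvPrimeDigit_digitChar (n % 10) (Nat.mod_lt _ (by norm_num))]
      ring

theorem pvToDigits_sum (m : Nat) :
    ((Nat.toDigits 10 m).map pvPrimeDigit).sum = pvSA m := by
  unfold Nat.toDigits
  rw [pvToDigitsCore_sum (m + 1) m [] (Nat.lt_succ_self m)]
  rw [pvSA_step m]; simp

-- ===== VERDICT (by name: the statement is the Claim_ definition above) =====
theorem ham4_spec : Claim_equal_ham4 := by
  intro n _ hp
  unfold Spec_ham4 ham4 ham4_alt
  have hn : n = ((n.toNat : Nat) : Int) := (Int.toNat_of_nonneg hp).symm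
  have hlist : (PySem.Int.toStr n).toList = Nat.toDigits 10 n.toNat := by
    rw [PySem.Int.toList_toStr]
    unfold PySem.Int.toChars
    simp [not_lt.mpr hp]
  rw [hlist, pvFoldl_eq_sum, pvToDigits_sum]
  conv_lhs => rw [hn]
  rw [ham4Loop_eq n.toNat 0]
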